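/- GENERATED by tools/from_farm_form.py from prooffarm-gif/accepted/_start/Proof.lean (a worked proof of the farm's unit `_start`,
   accepted by the verdict) — do not edit. -/
import Gif.Spec.Units.start
import Gif.Spec.Proved.start_Lemmas

/-!
  The stub `_start` of the base image (0x100000, 13 instructions; c/base/start.S) reaches `prog_exit` (0x100056) from a start state
  `Top.StartOK Gif.Spec.rt … len u` IN WHICH THE IMAGE'S CONSTANTS HAVE THEIR VALUES (`Gif.Spec.Consts u.mem`).

  THE PROOF IS THE GENERIC STUB'S (`ProgX.Base.Top.stub_reaches`, ProgX/Base/Spec/Stub.lean), COPIED, specialised to this program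
  (`R := Gif.Spec.rt`, `globals := Gif.Globals.objs`, `prog_main`'s contract for the empty heap, the objects
  `Gif.Globals.objs ++ initialObjs len` and no protected frame), with ONE CLAUSE ADDED: `Consts` holds of the memory at
  `prog_main`'s entry, because that memory agrees with the start memory on the image's data `[100000H, 700000H)` (`hdataR`: run_ctors
  wrote 32 bytes of stack and shadow bytes; then the push of `prog_main`'s return address, a stack store). The generic theorem cannot
  be used: it gives `prog_main` only `Top.MainPre`, which says nothing about the contents of the image's data. `prog_main`'s contract
  is used as it is (its `vspec` rules give the walker the numerals 1168 and the two windows), not weakened to `Top.stubMainSpec`.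

      0x100000            `call run_ctors`  (contract `runCtorsSpec rt`: `.init_array` and the descriptor table are read in a
                          memory that differs from the start memory by the pushed return address only)
      0x100005 (ret1)     run_ctors has returned: the image's data and the parameter block are off its footprint (its stack and
                          shadow bytes), so the six loads read the start state's parameter words
      0x100035            `call prog_main`: `Top.MainPre` from `StartOK.registered` / `.heap_cell` / `.heap_poisoned`, `Consts` from
                          `hdataR`; the rest of the precondition from the two: `stub_main_pre` (Lemmas.lean)
      0x10003a (ret2)     prog_main has returned: three unchecked stores at literal addresses of the parameter block, RIP = `L.exit`
-/

open X86 X86.User Asan ProgX ProgX.Base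

set_option maxRecDepth 4000
set_option maxHeartbeats 4000000

/-- The stub `_start` reaches `prog_exit`, for giflib's decoder: the generic stub's walk, with the image's constants carried from
the start state to `prog_main`'s entry. -/
theorem Gif.Spec.Proved.start_ok : Gif.Spec.start.Statement := by
  intro Lay hLay μ hμ u₀ hcode h_run_ctors h_prog_main
  intro len u hst hconsts hco
  -- the closed facts about this image's runtime record and globals (the generic theorem's `hR`, `hoff`, `hglobals_lo`, `htable`)
  have e_init : Gif.Spec.rt.sym.initArrayStart = 0x141000 := by decide
  have hoff : ∀ o, o ∈ Gif.Globals.objs → T.hi ≤ o.base := by decide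
  have hglobals_lo : ∀ o, o ∈ Gif.Globals.objs → o.base + o.size ≤ 0x800000 :=
    Top.globals_below_heap _ Gif.Globals.descs_ok
  have htable : 0x100000 ≤ Gif.Spec.rt.table ∧ Gif.Spec.rt.table + 64 * Gif.Spec.rt.descs.length ≤ 0x700000 := by decide
  -- the start state's facts under the names the walker reads (there is no `AtEntry`: nothing called the stub)
  have w_rip : u.rip = L._start.entry := hst.rip
  have c_rsp : u.reg .rsp = 0x800000 := hst.rsp
  have w_eq : Mem.EqOn L.textLo L.textHi u₀.mem u.mem := hco
  have hdf : u.flags .df = false := (show abiInv _ from hst.inv).1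
  have hmx : u.mxcsr &&& 0x1F80 = 0x1F80 := (show abiInv _ from hst.inv).2
  have hsse := sseOK_of_abiInv hst.inv
  have w_kept : RegsKept [.rsp] u u := RegsKept.refl _ _
  -- the contract of `prog_main` for the empty heap, the registered globals with IN and OUT, no protected frame
  have hmain := h_prog_main (Heap.empty 0x800000 0xC00000) (Gif.Globals.objs ++ initialObjs len) []
  -- 0x100000: call run_ctors
  u_walk hcode [hμ.vendor] span [L.textLo, L.textHi] side (v_side)
  case call_inv =>
    v_inv
  case pre_100000 =>
    -- run_ctors reads `.init_array` and the descriptor table in the memory after the push of its return address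
    have hdata : Mem.EqOn 0x100000 0x700000 u.mem s_100000.mem := by
      rw [w_mem]
      exact Mem.EqOn.writeLE _ _ _ _ _ _ (by decide) (by decide)
    exact ⟨Top.stub_ctorIn_eqOn hst.ctor hdata (by omega) (by omega), Top.stub_descsIn_eqOn hst.descs hdata htable.1 htable.2,
      hst.descs_ok⟩
  -- 0x100005 (ret1): the state run_ctors returned
  v_after_call w_rsp_100000 w_mem_100000
  -- the image's data and the parameter block are off run_ctors's footprint (32 bytes of stack, shadow bytes)
  have hdataR : Mem.EqOn 0x100000 0x700000 u.mem s_100000r.mem := by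
    refine Mem.EqOn.step_same (Mem.EqOn.writeLE _ _ _ _ _ _ (by decide) (by decide)) w_same ?_
    intro w hw
    rcases List.mem_cons.mp hw with rfl | hw
    · left
      decide
    · have hshadow := Top.registerWrites_shadow _ hst.descs_ok w hw
      omega
  -- … and so are the heap region [800000H, C00000H) and its shadow [D00000H, D80000H) (the globals' shadow ends below C40000H)
  have hheapR : Mem.EqOn 0x800000 0xC00000 u.mem s_100000r.mem := by
    refine Mem.EqOn.step_same (Mem.EqOn.writeLE _ _ _ _ _ _ (by decide) (by decide)) w_same ?_
    intro w hw
    rcases List.mem_cons.mp hw with rfl | hw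
    · right
      decide
    · have hshadow := Top.registerWrites_shadow _ hst.descs_ok w hw
      omega
  have hheapShR : Mem.EqOn 0xD00000 0xD80000 u.mem s_100000r.mem := by
    refine Mem.EqOn.step_same (Mem.EqOn.writeLE _ _ _ _ _ _ (by decide) (by decide)) w_same ?_
    intro w hw
    rcases List.mem_cons.mp hw with rfl | hw
    · right
      decide
    · have hshadow := Top.registerWrites_shadow _ hst.descs_ok w hw
      omega
  have hshR : Mem.EqOn 0xC00000 0xE00000 u.mem s_100000.mem := by
    rw [w_mem_100000]
    exact Mem.EqOn.writeLE _ _ _ _ _ _ (by decide) (by decide)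
  have p_in : s_100000r.mem.readLE 0x1FF000 8 = 0x200000 := by
    rw [hdataR.readLE _ 8 (by decide) (by decide) (by decide)]
    exact hst.param_in
  have p_len : s_100000r.mem.readLE 0x1FF008 8 = len := by
    rw [hdataR.readLE _ 8 (by decide) (by decide) (by decide)]
    exact hst.param_len
  have p_out : s_100000r.mem.readLE 0x1FF010 8 = 0x400000 := by
    rw [hdataR.readLE _ 8 (by decide) (by decide) (by decide)]
    exact hst.param_out
  have p_cap : s_100000r.mem.readLE 0x1FF018 8 = 0x300000 := by
    rw [hdataR.readLE _ 8 (by decide) (by decide) (by decide)]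
    exact hst.param_cap
  have p_heap : s_100000r.mem.readLE 0x1FF030 8 = 0x800000 := by
    rw [hdataR.readLE _ 8 (by decide) (by decide) (by decide)]
    exact hst.param_heap
  have p_hlen : s_100000r.mem.readLE 0x1FF038 8 = 0x400000 := by
    rw [hdataR.readLE _ 8 (by decide) (by decide) (by decide)]
    exact hst.param_heap_len
  have hpostR : Mem.EqOn 0xC00000 0xE00000 (registerMem s_100000.mem Gif.Spec.rt.descs) s_100000r.mem := w_post
  clear w_same w_post
  -- 0x100005 … 0x100035: the six parameter loads, call prog_main
  u_walk hcode [hμ.vendor] span [L.textLo, L.textHi] side (v_side)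
  case call_inv =>
    v_inv
  case pre_100035 =>
    -- the push of the return address went to the stack: off the shadow
    have hsh35 : Mem.EqOn 0xC00000 0xE00000 s_100000r.mem s_100035.mem := by
      rw [w_mem]
      exact Mem.EqOn.writeLE _ _ _ _ _ _ (by decide) (by decide)
    -- the shadow layer after the registration of the globals, the clean stack ending at 800000H = rsp + 8
    have hinv : ShadowInv (Gif.Globals.objs ++ initialObjs len) [] ((s_100035.reg .rsp).toNat + 8) s_100035.mem := by
      rw [w_rsp]
      exact hst.registered s_100000.mem s_100035.mem hshR (hpostR.trans hsh35)
    -- the heap region and its shadow are still the start state's: the push went to the stack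
    have hheap35 : Mem.EqOn 0x800000 0xC00000 u.mem s_100035.mem := by
      rw [w_mem]
      exact hheapR.step_writeLE _ _ _ (by decide) (by decide)
    have hheapSh35 : Mem.EqOn 0xD00000 0xD80000 u.mem s_100035.mem := by
      rw [w_mem]
      exact hheapShR.step_writeLE _ _ _ (by decide) (by decide)
    have hcell : s_100035.mem.readLE 0x800000 8 = 0 := by
      rw [hheap35.readLE _ 8 (by decide) (by decide) (by decide)]
      exact hst.heap_cell
    have hpois : ∀ g, 0x800000 / 8 ≤ g → g < 0xC00000 / 8 → 128 ≤ shadowOf s_100035.mem g := by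
      intro g hg1 hg2
      have e := shadowAddr_toNat g (by omega)
      have hsame : shadowOf s_100035.mem g = shadowOf u.mem g := by
        unfold shadowOf
        rw [hheapSh35 (shadowAddr g) (by omega) (by omega)]
      rw [hsame]
      exact hst.heap_poisoned g hg1 hg2
    -- no object of the layer lies in the heap region: the globals and IN, OUT end below it
    have hout : ∀ o, o ∈ Gif.Globals.objs ++ initialObjs len → o.base + o.size ≤ 0x800000 ∨ 0xC00000 ≤ o.base := by
      intro o ho
      rcases List.mem_append.mp ho with hg | hi
      · exact Or.inl (hglobals_lo o hg)
      · exact Top.initialObjs_off_heap len hst.len_le o hi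
    have hmp : Top.MainPre Gif.Globals.objs len s_100035 :=
      ⟨w_rdi, w_rsi, w_rdx, w_rcx, w_r8, w_r9, hst.len_le, ⟨hinv, Top.mainPre_offText Gif.Globals.objs len hoff⟩,
        Top.heapInv_empty hinv hcell hpois hout⟩
    -- THE ADDED CLAUSE: the image's data is still the start state's (run_ctors's footprint, then a stack store)
    have hdata35 : Mem.EqOn 0x100000 0x700000 u.mem s_100035.mem := by
      rw [w_mem]
      exact hdataR.step_writeLE _ _ _ (by decide) (by decide)
    exact Gif.Spec.start.stub_main_pre len s_100035 hmp (Gif.Spec.start.stub_consts_eqOn hconsts hdata35)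
  -- 0x10003a (ret2): the state prog_main returned; its result is any word, its footprint is not needed
  v_after_call w_rsp_100035 w_mem_100035
  obtain ⟨z, w_rax⟩ : ∃ z, s_100035r.reg .rax = z := ⟨_, rfl⟩
  clear w_same w_post
  -- 0x10003a … 0x100056: the three unchecked stores of the result, `prog_exit: hlt` not yet executed
  u_walk hcode [hμ.vendor] until [L.exit] span [L.textLo, L.textHi] side (v_side)
  -- 0x100056: EXIT
  refine ReachVia.done ?_
  exact w_rip
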